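-- pv_equiv track=rewrite | github.com/jetsetmette/VGP | src/vgp_helper_fx.py | get_licks_per_trial
-- ===== SOURCE A (Python) =====
-- def get_licks_per_trial(pump_frames, licks_frames, trial_end=100):
--
--     licks_per_trial=[]
--     for p in pump_frames:
--         temp=[]
--         for l in licks_frames:
--             if l > p and l < p + trial_end:
--                 temp.append(l)
--         licks_per_trial.append(temp)
--
--     return licks_per_trial
-- ===== SOURCE B (Python) =====
-- def get_licks_per_trial(pump_frames, licks_frames, trial_end=100):
--     # Sort the licks (paired with their positions) by value once; for each pump,
--     # scan past the licks at or below the window start, collect while inside the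
--     # window, then restore the original lick order via the stored positions.
--     by_value = sorted(enumerate(licks_frames), key=lambda t: t[1])
--     n = len(by_value)
--     out = []
--     for p in pump_frames:
--         i = 0
--         while i < n and by_value[i][1] <= p:      # drop the prefix below/at p
--             i += 1
--         window = []
--         while i < n and by_value[i][1] < p + trial_end:   # take the window
--             window.append(by_value[i])
--             i += 1
--         window.sort(key=lambda t: t[0])           # back to original order
--         out.append([v for _, v in window])
--     return out
-- ===== Notes on version B (the rewrite author's own statement) =====
-- stated objective: alternative
-- what changed: B sorts the licks (with their positions) by value once, then per pump skips the prefix at or below the window start and collects a contiguous sorted run, stopping at the window end, re-sorting the run by position to restore A's output order; A instead tests every lick against every pump.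
import Mathlib
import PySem

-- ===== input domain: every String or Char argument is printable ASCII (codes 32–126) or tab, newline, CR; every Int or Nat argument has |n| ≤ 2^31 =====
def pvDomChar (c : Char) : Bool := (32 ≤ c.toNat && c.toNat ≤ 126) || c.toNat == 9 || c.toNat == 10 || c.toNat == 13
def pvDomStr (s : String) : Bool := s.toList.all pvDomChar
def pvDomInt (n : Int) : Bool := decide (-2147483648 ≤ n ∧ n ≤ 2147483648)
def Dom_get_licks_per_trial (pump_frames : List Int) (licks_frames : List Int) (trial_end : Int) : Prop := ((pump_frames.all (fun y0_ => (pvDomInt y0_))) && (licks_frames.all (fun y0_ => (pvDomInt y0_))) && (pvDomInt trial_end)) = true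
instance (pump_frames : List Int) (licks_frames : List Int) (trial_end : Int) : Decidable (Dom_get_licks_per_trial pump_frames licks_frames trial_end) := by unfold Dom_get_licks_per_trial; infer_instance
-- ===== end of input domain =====

-- B sorts the licks (with their positions) by value once, then per pump skips the
-- prefix at or below the window start, collects the contiguous window run, and
-- re-sorts it by position to restore A's output order (objective: alternative).

-- ===== PORT A =====
def get_licks_per_trial (pump_frames : List Int) (licks_frames : List Int) (trial_end : Int) : List (List Int) :=
  pump_frames.foldl (fun licks_per_trial p =>
    licks_per_trial ++
      [licks_frames.foldl (fun temp l =>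
        if l > p ∧ l < p + trial_end then temp ++ [l] else temp) []]) []

-- ===== PORT B =====
-- the two index-based while loops of Source B are the prefix scans dropWhile / takeWhile
def get_licks_per_trial_alt (pump_frames : List Int) (licks_frames : List Int) (trial_end : Int) : List (List Int) :=
  let byValue := PySem.List.sorted (PySem.List.enumerate licks_frames) (fun t => t.2)
  pump_frames.foldl (fun out p =>
    let window := (byValue.dropWhile (fun t => decide (t.2 ≤ p))).takeWhile
        (fun t => decide (t.2 < p + trial_end))
    out ++ [(PySem.List.sorted window (fun t => t.1)).map (·.2)]) []

-- ===== PRECONDITION & SPEC =====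
def Spec_get_licks_per_trial (pump_frames : List Int) (licks_frames : List Int) (trial_end : Int) (out : List (List Int)) : Prop := out = get_licks_per_trial_alt pump_frames licks_frames trial_end
instance (pump_frames : List Int) (licks_frames : List Int) (trial_end : Int) (out : List (List Int)) : Decidable (Spec_get_licks_per_trial pump_frames licks_frames trial_end out) := by unfold Spec_get_licks_per_trial; infer_instance

-- ===== CLAIM (what is proved, stated in full; the proofs are below) =====
def Claim_equal_get_licks_per_trial : Prop := ∀ (pump_frames : List Int) (licks_frames : List Int) (trial_end : Int), Dom_get_licks_per_trial pump_frames licks_frames trial_end → Spec_get_licks_per_trial pump_frames licks_frames trial_end (get_licks_per_trial pump_frames licks_frames trial_end)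

-- ===== LEMMAS AND PROOFS =====

-- On a list sorted by value, takeWhile (value < hi) is filter (value < hi).
theorem pvTakeWhileFilter (hi : Int) :
    ∀ xs : List (Int × Int), xs.Pairwise (fun a b => a.2 ≤ b.2) →
      xs.takeWhile (fun t => decide (t.2 < hi)) = xs.filter (fun t => decide (t.2 < hi)) := by
  intro xs h
  induction xs with
  | nil => rfl
  | cons t ts ih =>
    rcases List.pairwise_cons.mp h with ⟨hhd, htl⟩
    by_cases hlt : t.2 < hi
    · simp [hlt, ih htl]
    · simp only [List.takeWhile_cons, List.filter_cons, decide_eq_true_eq]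
      rw [if_neg hlt, if_neg hlt, eq_comm, List.filter_eq_nil_iff]
      intro u hu
      have := hhd u hu
      simp only [decide_eq_true_eq]
      omega

-- Drop the prefix ≤ p, take while < hi: on a value-sorted list this is the window filter.
theorem pvDropTakeFilter (p hi : Int) :
    ∀ xs : List (Int × Int), xs.Pairwise (fun a b => a.2 ≤ b.2) →
      (xs.dropWhile (fun t => decide (t.2 ≤ p))).takeWhile (fun t => decide (t.2 < hi))
        = xs.filter (fun t => decide (p < t.2) && decide (t.2 < hi)) := by
  intro xs h
  induction xs with
  | nil => rfl
  | cons t ts ih =>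
    rcases List.pairwise_cons.mp h with ⟨hhd, htl⟩
    by_cases hle : t.2 ≤ p
    · have : ¬ p < t.2 := by omega
      simp [hle, this, ih htl]
    · rw [List.dropWhile_cons_of_neg (by simpa using hle)]
      rw [pvTakeWhileFilter hi (t :: ts) h]
      apply List.filter_congr
      intro u hu
      rcases List.mem_cons.mp hu with rfl | hu'
      · simp; omega
      · have := hhd u hu'
        simp
        omega

-- Mapping snd over a value-filtered enumeration filters the values.
theorem pvMapSndFilterEnum (q : Int → Bool) :
    ∀ (lf : List Int) (s : Int),
      ((PySem.List.enumerate lf s).filter (fun t => q t.2)).map (·.2) = lf.filter q := by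
  intro lf
  induction lf with
  | nil => intro s; rfl
  | cons l ls ih =>
    intro s
    rw [PySem.List.enumerate_cons]
    by_cases hq : q l
    · simp [hq, ih (s + 1)]
    · simp [hq, ih (s + 1)]

-- Two permuted lists strictly sorted on the first component are equal.
theorem pvEqOfPermOfPairwiseLt {l₁ l₂ : List (Int × Int)} (hp : l₁.Perm l₂)
    (h₁ : l₁.Pairwise (fun a b => a.1 < b.1)) (h₂ : l₂.Pairwise (fun a b => a.1 < b.1)) :
    l₁ = l₂ :=
  hp.eq_of_pairwise (fun a b _ _ hab hba => absurd hba (by omega)) h₁ h₂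

-- Pairwise ≤ on fst plus distinct fsts gives Pairwise < on fst.
theorem pvPairwiseLtOfLeNodup {l : List (Int × Int)}
    (h1 : l.Pairwise (fun a b => a.1 ≤ b.1)) (h2 : (l.map (·.1)).Nodup) :
    l.Pairwise (fun a b => a.1 < b.1) := by
  have h2' : l.Pairwise (fun a b => a.1 ≠ b.1) := (List.pairwise_map.mp h2)
  exact (h1.and h2').imp (fun h => by omega)

-- The per-pump window of B, re-sorted by position, is exactly A's per-pump filter.
theorem pvPerPump (lf : List Int) (p te : Int) :
    ((PySem.List.sorted
        (((PySem.List.sorted (PySem.List.enumerate lf) (fun t => t.2)).dropWhile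
            (fun t => decide (t.2 ≤ p))).takeWhile (fun t => decide (t.2 < p + te)))
        (fun t => t.1)).map (·.2))
      = lf.filter (fun l => decide (p < l) && decide (l < p + te)) := by
  set byValue := PySem.List.sorted (PySem.List.enumerate lf) (fun t => t.2) with hbv
  have hbvPair : byValue.Pairwise (fun a b => a.2 ≤ b.2) :=
    PySem.List.sorted_pairwise (PySem.List.enumerate lf) (fun t => t.2)
  have hbvPerm : byValue.Perm (PySem.List.enumerate lf) :=
    PySem.List.sorted_perm (PySem.List.enumerate lf) (fun t => t.2) false
  rw [pvDropTakeFilter p (p + te) byValue hbvPair]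
  have hq : (fun t : Int × Int => decide (p < t.2) && decide (t.2 < p + te))
      = fun t => (fun v : Int => decide (p < v) && decide (v < p + te)) t.2 := rfl
  rw [hq]
  set cond : Int × Int → Bool := fun t => (fun v : Int => decide (p < v) && decide (v < p + te)) t.2 with hc
  set window := byValue.filter cond with hw
  -- the target of the re-sort: the filter of the enumeration, in original order
  have hPerm : (PySem.List.sorted window (fun t => t.1)).Perm
      ((PySem.List.enumerate lf).filter cond) :=
    ((PySem.List.sorted_perm window (fun t => t.1) false).trans (hbvPerm.filter cond))
  have hEnumLt : ((PySem.List.enumerate lf : List (Int × Int))).Pairwise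
      (fun a b => a.1 < b.1) := PySem.List.pairwise_lt_enumerate lf 0
  have hRhsLt : (((PySem.List.enumerate lf).filter cond)).Pairwise (fun a b => a.1 < b.1) :=
    hEnumLt.sublist List.filter_sublist
  have hNodupEnum : ((PySem.List.enumerate lf).map (·.1)).Nodup :=
    List.pairwise_map.mpr (hEnumLt.imp (fun h => by omega))
  have hNodupSorted : ((PySem.List.sorted window (fun t => t.1)).map (·.1)).Nodup := by
    have hsub : (((PySem.List.enumerate lf).filter cond).map (·.1)).Nodup :=
      ((List.filter_sublist (l := PySem.List.enumerate lf) (p := cond)).map (·.1)).nodup hNodupEnum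
    exact (hPerm.map (·.1)).nodup_iff.mpr hsub
  have hLhsLt : (PySem.List.sorted window (fun t => t.1)).Pairwise (fun a b => a.1 < b.1) :=
    pvPairwiseLtOfLeNodup (PySem.List.sorted_pairwise window (fun t => t.1)) hNodupSorted
  rw [pvEqOfPermOfPairwiseLt hPerm hLhsLt hRhsLt]
  exact pvMapSndFilterEnum (fun v => decide (p < v) && decide (v < p + te)) lf 0

-- ===== VERDICT (by name: the statement is the Claim_ definition above) =====
theorem get_licks_per_trial_spec : Claim_equal_get_licks_per_trial := by
  intro pf lf te _
  unfold Spec_get_licks_per_trial get_licks_per_trial get_licks_per_trial_alt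
  rw [PySem.List.foldl_append_singleton_eq_map, PySem.List.foldl_append_singleton_eq_map]
  simp only [List.nil_append]
  apply List.map_congr_left
  intro p _
  rw [PySem.List.foldl_append_ite_eq_filter]
  rw [pvPerPump lf p te]
  apply List.filter_congr
  intro l _
  simp [gt_iff_lt]
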